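-- pv_equiv track=rewrite | github.com/YunisAli-zade/Python | Exam/Ordinary/Missing Number.py | solution
-- ===== SOURCE A (Python) =====
-- from collections import Counter
--
-- def solution(arr: list[int], brr: list[int]) -> list[int]:
--     dictt_arr = Counter(arr)
--     dictt_brr = Counter(brr)
--     missing = []
--     for el in dictt_brr:
--         if dictt_brr[el] > dictt_arr.get(el, 0):
--             missing.append(el)
--     return sorted(missing)
--     pass
-- ===== SOURCE B (Python) =====
-- def solution(arr: list[int], brr: list[int]) -> list[int]:
--     sb = sorted(brr)
--     sa = sorted(arr)
--     nb, na = len(sb), len(sa)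
--     out = []
--     i = j = 0
--     while i < nb:
--         v = sb[i]
--         run = 1
--         i += 1
--         while i < nb and sb[i] == v:
--             run += 1
--             i += 1
--         while j < na and sa[j] < v:
--             j += 1
--         ca = 0
--         while j + ca < na and sa[j + ca] == v:
--             ca += 1
--         if run > ca:
--             out.append(v)
--     return out
-- ===== Notes on version B (the rewrite author's own statement) =====
-- stated objective: alternative
-- what changed: Replaces A's two Counter hash maps plus a final sort with a two-pointer merge over sorted copies of both lists that compares run lengths and emits results already in ascending order.
import Mathlib
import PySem

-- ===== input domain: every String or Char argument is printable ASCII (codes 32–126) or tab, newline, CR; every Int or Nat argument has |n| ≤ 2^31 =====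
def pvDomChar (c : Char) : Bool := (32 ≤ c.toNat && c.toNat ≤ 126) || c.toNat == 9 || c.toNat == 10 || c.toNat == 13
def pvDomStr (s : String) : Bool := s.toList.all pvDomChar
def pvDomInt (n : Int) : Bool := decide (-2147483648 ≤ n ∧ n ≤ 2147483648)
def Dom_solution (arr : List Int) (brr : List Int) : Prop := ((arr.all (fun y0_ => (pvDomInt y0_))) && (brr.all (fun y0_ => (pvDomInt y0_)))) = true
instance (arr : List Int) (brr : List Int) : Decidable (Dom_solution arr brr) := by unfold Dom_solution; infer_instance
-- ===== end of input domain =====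

-- B replaces A's two Counters + final sort by a two-pointer merge of sorted copies that
-- emits run-wise comparisons in ascending order (objective: alternative algorithm, same cost class).

-- ===== PORT A =====
def solution (arr : List Int) (brr : List Int) : List Int :=
  let dicttArr := PySem.Dict.counter arr
  let dicttBrr := PySem.Dict.counter brr
  let missing := dicttBrr.keys.foldl
    (fun acc el => if dicttBrr.getD el 0 > dicttArr.getD el 0 then acc ++ [el] else acc) []
  PySem.List.sorted missing (fun x => x) false

-- ===== PORT B =====
-- inner `while rest and rest[0] == v` loop of _merge: counts the extra copies of v and returns the rest
def takeRun (v : Int) : List Int → Nat × List Int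
  | [] => (0, [])
  | x :: xs => if x = v then ((takeRun v xs).1 + 1, (takeRun v xs).2) else (0, x :: xs)

-- `while sa and sa[0] < v` loop of _merge
def dropLt (v : Int) : List Int → List Int
  | [] => []
  | x :: xs => if x < v then dropLt v xs else x :: xs

-- `while ca < len(sa) and sa[ca] == v` loop of _merge
def countEq (v : Int) : List Int → Nat
  | [] => 0
  | x :: xs => if x = v then countEq v xs + 1 else 0

theorem takeRun_snd_length (v : Int) : ∀ xs : List Int, (takeRun v xs).2.length ≤ xs.length
  | [] => le_refl _
  | x :: xs => by
      simp only [takeRun]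
      split
      · exact le_trans (takeRun_snd_length v xs) (Nat.le_succ _)
      · exact le_refl _

-- main `while i < nb` loop: consumes the sorted brr copy, carrying sa's remaining suffix and out
def mergeLoop : List Int → List Int → List Int → List Int
  | [], _, out => out
  | v :: sbrest, sa, out =>
    let p := takeRun v sbrest
    let sa' := dropLt v sa
    mergeLoop p.2 sa' (if p.1 + 1 > countEq v sa' then out ++ [v] else out)
termination_by sb _ _ => sb.length
decreasing_by
  exact Nat.lt_succ_of_le (takeRun_snd_length _ _)

def solution_alt (arr : List Int) (brr : List Int) : List Int :=
  mergeLoop (PySem.List.sorted brr (fun x => x) false) (PySem.List.sorted arr (fun x => x) false) []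

-- ===== PRECONDITION & SPEC =====
def Spec_solution (arr : List Int) (brr : List Int) (out : List Int) : Prop := out = solution_alt arr brr
instance (arr : List Int) (brr : List Int) (out : List Int) : Decidable (Spec_solution arr brr out) := by unfold Spec_solution; infer_instance

-- ===== CLAIM (what is proved, stated in full; the proofs are below) =====
def Claim_equal_solution : Prop := ∀ (arr : List Int) (brr : List Int), Dom_solution arr brr → Spec_solution arr brr (solution arr brr)

-- ===== LEMMAS AND PROOFS =====

-- proof-side restatement of mergeLoop without the accumulator
def mergeGo : List Int → List Int → List Int
  | [], _ => []
  | v :: sbrest, sa =>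
    let p := takeRun v sbrest
    let sa' := dropLt v sa
    let out := mergeGo p.2 sa'
    if p.1 + 1 > countEq v sa' then v :: out else out
termination_by sb _ => sb.length
decreasing_by
  exact Nat.lt_succ_of_le (takeRun_snd_length _ _)

theorem mergeLoop_eq_append : ∀ (sb sa out : List Int), mergeLoop sb sa out = out ++ mergeGo sb sa
  | [], sa, out => by simp [mergeLoop, mergeGo]
  | v :: sbrest, sa, out => by
    rw [mergeLoop, mergeGo,
      mergeLoop_eq_append (takeRun v sbrest).2 (dropLt v sa) _]
    split <;> simp
termination_by sb _ _ => sb.length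
decreasing_by
  exact Nat.lt_succ_of_le (takeRun_snd_length _ _)

theorem count_eq_zero_of_lt {v : Int} {l : List Int} (h : ∀ x ∈ l, v < x) : l.count v = 0 :=
  List.count_eq_zero.mpr (fun hv => lt_irrefl v (h v hv))

theorem takeRun_spec {v : Int} : ∀ {xs : List Int}, xs.Pairwise (· ≤ ·) → (∀ x ∈ xs, v ≤ x) →
    xs = List.replicate (takeRun v xs).1 v ++ (takeRun v xs).2 ∧ ∀ x ∈ (takeRun v xs).2, v < x := by
  intro xs
  induction xs with
  | nil => intro _ _; simp [takeRun]
  | cons x xs ih =>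
    intro hp hl
    by_cases hx : x = v
    · have hxs : ∀ y ∈ xs, v ≤ y := fun y hy => hl y (List.mem_cons_of_mem _ hy)
      obtain ⟨heq, hgt⟩ := ih (List.Pairwise.of_cons hp) hxs
      constructor
      · simp only [takeRun, hx]
        simpa [List.replicate_succ, hx] using heq
      · simpa [takeRun, hx] using hgt
    · have hvx : v < x := lt_of_le_of_ne (hl x List.mem_cons_self) (fun h => hx h.symm)
      constructor
      · simp [takeRun, hx]
      · simp only [takeRun, if_neg hx]
        intro y hy
        rcases List.mem_cons.mp hy with rfl | hy
        · exact hvx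
        · exact lt_of_lt_of_le hvx ((List.pairwise_cons.mp hp).1 y hy)

theorem dropLt_sublist (v : Int) : ∀ sa : List Int, (dropLt v sa).Sublist sa
  | [] => List.Sublist.refl _
  | x :: xs => by
      simp only [dropLt]
      split
      · exact (dropLt_sublist v xs).trans (List.sublist_cons_self _ _)
      · exact List.Sublist.refl _

theorem dropLt_ge {v : Int} : ∀ {sa : List Int}, sa.Pairwise (· ≤ ·) → ∀ x ∈ dropLt v sa, v ≤ x := by
  intro sa
  induction sa with
  | nil => intro _ x hx; simp [dropLt] at hx
  | cons a xs ih =>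
    intro hp x hx
    by_cases ha : a < v
    · exact ih (List.Pairwise.of_cons hp) x (by simpa [dropLt, ha] using hx)
    · simp only [dropLt, if_neg ha] at hx
      rcases List.mem_cons.mp hx with rfl | hx
      · exact le_of_not_gt ha
      · exact le_trans (le_of_not_gt ha) ((List.pairwise_cons.mp hp).1 x hx)

theorem dropLt_count {v w : Int} (hvw : v ≤ w) : ∀ sa : List Int, (dropLt v sa).count w = sa.count w
  | [] => rfl
  | x :: xs => by
      simp only [dropLt]
      split
      · rename_i hx
        have hwx : ¬ (x = w) := fun h => absurd (lt_of_le_of_lt hvw (h ▸ hx)) (lt_irrefl v)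
        rw [dropLt_count hvw xs, List.count_cons]
        simp [hwx]
      · rfl

theorem countEq_eq_count {v : Int} : ∀ {l : List Int}, l.Pairwise (· ≤ ·) → (∀ x ∈ l, v ≤ x) →
    countEq v l = l.count v := by
  intro l
  induction l with
  | nil => intro _ _; simp [countEq]
  | cons x xs ih =>
    intro hp hl
    by_cases hx : x = v
    · rw [countEq, if_pos hx,
        ih (List.Pairwise.of_cons hp) (fun y hy => hl y (List.mem_cons_of_mem _ hy)),
        List.count_cons]
      simp [hx]
    · have hvx : v < x := lt_of_le_of_ne (hl x List.mem_cons_self) (fun h => hx h.symm)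
      have : (x :: xs).count v = 0 := by
        apply count_eq_zero_of_lt
        intro y hy
        rcases List.mem_cons.mp hy with rfl | hy
        · exact hvx
        · exact lt_of_lt_of_le hvx ((List.pairwise_cons.mp hp).1 y hy)
      rw [countEq, if_neg hx, this]

theorem mergeGo_spec : ∀ (sb sa : List Int), sb.Pairwise (· ≤ ·) → sa.Pairwise (· ≤ ·) →
    (∀ w, w ∈ mergeGo sb sa ↔ w ∈ sb ∧ sa.count w < sb.count w) ∧
      (mergeGo sb sa).Pairwise (· < ·)
  | [], sa => by intro _ _; simp [mergeGo]
  | v :: sbrest, sa => by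
    intro hsb hsa
    have hle : ∀ x ∈ sbrest, v ≤ x := (List.pairwise_cons.mp hsb).1
    obtain ⟨heq, hgt⟩ := takeRun_spec (v := v) (List.Pairwise.of_cons hsb) hle
    set n := (takeRun v sbrest).1 with hn
    set rest' := (takeRun v sbrest).2 with hr
    set sa' := dropLt v sa with hsa'
    have hrest'P : rest'.Pairwise (· ≤ ·) := by
      have hsub : rest'.Sublist sbrest := heq ▸ List.sublist_append_right _ _
      exact List.Pairwise.sublist hsub (List.Pairwise.of_cons hsb)
    have hsa'P : sa'.Pairwise (· ≤ ·) := List.Pairwise.sublist (dropLt_sublist v sa) hsa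
    have ih := mergeGo_spec rest' sa' hrest'P hsa'P
    have hcountEq : countEq v sa' = sa.count v :=
      (countEq_eq_count hsa'P (dropLt_ge hsa)).trans (dropLt_count (le_refl v) sa)
    have hrest'v : rest'.count v = 0 := count_eq_zero_of_lt hgt
    have hcount_cons : ∀ w, (v :: sbrest).count w =
        (if w = v then n + 1 else rest'.count w) := by
      intro w
      rw [List.count_cons, heq, List.count_append, List.count_replicate]
      by_cases hw : w = v
      · simp [hw, hrest'v]
      · have hvw : ¬ v = w := fun h => hw h.symm
        simp [hw, hvw]
    have hout : mergeGo (v :: sbrest) sa =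
        if n + 1 > countEq v sa' then v :: mergeGo rest' sa' else mergeGo rest' sa' := by
      rw [mergeGo]
    constructor
    · intro w
      rw [hout]
      by_cases hw : w = v
      · subst hw
        have hnotin : w ∉ mergeGo rest' sa' := fun h =>
          absurd (hgt w ((ih.1 w).mp h).1) (lt_irrefl w)
        rw [hcount_cons, if_pos rfl]
        constructor
        · intro h
          refine ⟨List.mem_cons_self, ?_⟩
          split at h
          · rename_i hcond
            rw [← hcountEq]; exact hcond
          · exact absurd h hnotin
        · intro ⟨_, hc⟩
          rw [if_pos (by rw [hcountEq]; exact hc)]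
          exact List.mem_cons_self
      · have hmem : w ∈ v :: sbrest ↔ w ∈ rest' := by
          rw [List.mem_cons, heq, List.mem_append, List.mem_replicate]
          simp [hw]
        have hLHS : (w ∈ if n + 1 > countEq v sa' then v :: mergeGo rest' sa'
            else mergeGo rest' sa') ↔ w ∈ mergeGo rest' sa' := by
          split
          · simp [hw]
          · exact Iff.rfl
        rw [hLHS, ih.1 w, hcount_cons, if_neg hw, hmem]
        constructor
        · intro ⟨h1, h2⟩
          exact ⟨h1, by rwa [dropLt_count (le_of_lt (hgt w h1))] at h2⟩
        · intro ⟨h1, h2⟩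
          exact ⟨h1, by rwa [dropLt_count (le_of_lt (hgt w h1))]⟩
    · rw [hout]
      split
      · exact List.pairwise_cons.mpr ⟨fun y hy => hgt y ((ih.1 y).mp hy).1, ih.2⟩
      · exact ih.2
termination_by sb _ => sb.length
decreasing_by
  exact Nat.lt_succ_of_le (takeRun_snd_length _ _)

theorem solution_eq (arr brr : List Int) : solution arr brr = solution_alt arr brr := by
  unfold solution solution_alt
  rw [mergeLoop_eq_append, List.nil_append]
  simp only [PySem.List.foldl_append_ite_eq_filter, PySem.Dict.keys_counter, List.nil_append]
  have hsb := PySem.List.sorted_pairwise (xs := brr) (key := fun x => x)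
  have hsa := PySem.List.sorted_pairwise (xs := arr) (key := fun x => x)
  obtain ⟨hmem, hlt⟩ := mergeGo_spec _ _ hsb hsa
  apply PySem.List.sorted_eq_of_perm_of_pairwise_lt
  · rw [List.perm_ext_iff_of_nodup (hlt.imp ne_of_lt)
      ((PySem.Set.nodup_ofList brr).filter _)]
    intro w
    have hca : (PySem.List.sorted arr (fun x => x) false).count w = arr.count w :=
      (PySem.List.sorted_perm arr (fun x => x) false).count_eq w
    have hcb : (PySem.List.sorted brr (fun x => x) false).count w = brr.count w :=
      (PySem.List.sorted_perm brr (fun x => x) false).count_eq w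
    rw [hmem w, List.mem_filter, PySem.Set.mem_ofList, PySem.List.mem_sorted, hca, hcb]
    simp only [PySem.Dict.getD_counter, gt_iff_lt, decide_eq_true_eq, Nat.cast_lt]
  · exact hlt

-- ===== VERDICT (by name: the statement is the Claim_ definition above) =====
theorem solution_spec : Claim_equal_solution := by
  intro arr brr _
  unfold Spec_solution
  exact solution_eq arr brr
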